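-- pv_equiv track=rewrite | github.com/ICL-ml4csec/SQIRL | Environment/Input/Crawler.py | replacate_multivariable
-- ===== SOURCE A (Python) =====
-- import copy
--
-- def replacate_multivariable(multivariables):
--     '''
--         replecate forms and mark the injection input and static inputs
--     '''
--     result_forms = []
--     for current_form in multivariables:
--         # iterate over each input everytime creating
--         # a copy of orig form and setting injection
--         # point and static point
--         for current_input in range(len(current_form["inputs"])):
--             current_new_form = copy.deepcopy(current_form)
--             for new_current_input in range(len(current_new_form["inputs"])):
--                 if current_input == new_current_input:
--                     current_new_form["inputs"][new_current_input]["input_use"] = "injection_point"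
--                 else:
--                     current_new_form["inputs"][new_current_input]["input_use"] = "static"
--             result_forms.append(current_new_form)
--     return result_forms
-- ===== SOURCE B (Python) =====
-- def _set_use(inp, use):
--     d = dict(inp)
--     d["input_use"] = use
--     return d
--
-- def _variants(inputs):
--     # all markings of `inputs` with exactly one injection point, by structural
--     # recursion: the head is the injection point in the first variant and
--     # static in every later one
--     if not inputs:
--         return []
--     head, tail = inputs[0], inputs[1:]
--     first = [_set_use(head, "injection_point")] + [_set_use(x, "static") for x in tail]
--     return [first] + [[_set_use(head, "static")] + v for v in _variants(tail)]
--
-- def replacate_multivariable(multivariables):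
--     '''
--         replecate forms and mark the injection input and static inputs
--     '''
--     result_forms = []
--     for form in multivariables:
--         for marked in _variants(form["inputs"]):
--             result_forms.append({k: (marked if k == "inputs" else v) for k, v in form.items()})
--     return result_forms
-- ===== Notes on version B (the rewrite author's own statement) =====
-- stated objective: alternative
-- what changed: B replaces A's index-driven nested loops (range over inputs, per-copy if/else marking and deepcopy) by a structural recursion _variants over the inputs list that builds all one-injection-point markings at once (head marked injection in the first variant, static and prepended in the rest), each result form then being a dict comprehension swapping in one variant; Pre_ excludes forms without an 'inputs' key (both raise KeyError) and association lists with duplicate keys, which do not represent Python dicts.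
import Mathlib
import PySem

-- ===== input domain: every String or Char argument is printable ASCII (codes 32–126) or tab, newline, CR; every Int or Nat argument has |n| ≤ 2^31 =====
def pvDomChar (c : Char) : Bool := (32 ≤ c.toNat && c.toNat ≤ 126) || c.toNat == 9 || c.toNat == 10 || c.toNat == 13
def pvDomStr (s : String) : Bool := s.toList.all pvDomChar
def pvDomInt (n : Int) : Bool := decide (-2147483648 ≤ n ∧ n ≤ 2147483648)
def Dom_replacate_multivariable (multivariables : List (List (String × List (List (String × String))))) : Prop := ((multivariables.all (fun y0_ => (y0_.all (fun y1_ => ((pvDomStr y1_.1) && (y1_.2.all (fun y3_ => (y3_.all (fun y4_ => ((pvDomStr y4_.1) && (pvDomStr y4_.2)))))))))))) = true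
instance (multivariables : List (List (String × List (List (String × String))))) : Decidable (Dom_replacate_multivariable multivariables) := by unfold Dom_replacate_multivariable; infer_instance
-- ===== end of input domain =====

-- B replaces A's index-driven nested marking loops by a structural recursion over the inputs
-- list that produces all one-injection-point markings at once; same cost, no index arithmetic.
-- Dicts are association lists (insertion order, first-match lookup); neither program mutates its argument.

-- ===== PORT A =====

-- dict assignment d[k] = v: overwrite the first matching key in place, else append
def dset (d : List (String × String)) (k v : String) : List (String × String) :=
  match d with
  | [] => [(k, v)]
  | (k', v') :: rest => if k' == k then (k, v) :: rest else (k', v') :: dset rest k v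

-- in-place mutation of the (first) value stored under key k (no-op if absent)
def dmodify (d : List (String × List (List (String × String)))) (k : String)
    (f : List (List (String × String)) → List (List (String × String))) :
    List (String × List (List (String × String))) :=
  match d with
  | [] => []
  | (k', v) :: rest => if k' == k then (k', f v) :: rest else (k', v) :: dmodify rest k f

-- A's inner loop: walk the inputs with counter j, marking index i injection and the rest static
def markInputsA (i : Nat) (j : Nat) (ins : List (List (String × String))) :
    List (List (String × String)) :=
  match ins with
  | [] => []
  | inp :: rest =>
      dset inp "input_use" (if i == j then "injection_point" else "static") :: markInputsA i (j + 1) rest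

def replacate_multivariable (multivariables : List (List (String × List (List (String × String))))) : List (List (String × List (List (String × String)))) :=
  multivariables.foldl
    (fun result_forms current_form =>
      (List.range ((List.lookup "inputs" current_form).getD []).length).foldl
        (fun acc current_input =>
          acc ++ [dmodify current_form "inputs" (fun ins => markInputsA current_input 0 ins)])
        result_forms)
    []

-- ===== PORT B =====

-- _variants: structural recursion producing every marking with exactly one injection point
def variantsB (ins : List (List (String × String))) : List (List (List (String × String))) :=
  match ins with
  | [] => []
  | head :: tail =>
      (dset head "input_use" "injection_point" :: tail.map (fun x => dset x "input_use" "static"))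
        :: (variantsB tail).map (fun v => dset head "input_use" "static" :: v)

-- the dict comprehension {k: marked if k == "inputs" else v for k, v in form.items()}
def swapInputs (form : List (String × List (List (String × String))))
    (marked : List (List (String × String))) : List (String × List (List (String × String))) :=
  form.map (fun p => if p.1 == "inputs" then (p.1, marked) else p)

def replacate_multivariable_alt (multivariables : List (List (String × List (List (String × String))))) : List (List (String × List (List (String × String)))) :=
  multivariables.foldl
    (fun result_forms form =>
      (variantsB ((List.lookup "inputs" form).getD [])).foldl
        (fun acc marked => acc ++ [swapInputs form marked])
        result_forms)
    []

-- ===== PRECONDITION & SPEC =====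
-- Pre_ excludes forms without an "inputs" key, on which both Pythons raise KeyError, and
-- association lists with duplicate keys, which do not represent any Python dict.
def Pre_replacate_multivariable (multivariables : List (List (String × List (List (String × String))))) : Prop :=
  ∀ form ∈ multivariables,
    (List.lookup "inputs" form).isSome ∧ (form.map Prod.fst).Nodup ∧
    ∀ p ∈ form, ∀ inp ∈ p.2, (inp.map Prod.fst).Nodup
instance (multivariables : List (List (String × List (List (String × String))))) : Decidable (Pre_replacate_multivariable multivariables) := by unfold Pre_replacate_multivariable; infer_instance

def pvWitness_replacate_multivariable : (List (List (String × List (List (String × String))))) :=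
  [[("inputs", [[("name", "a")], [("name", "b"), ("input_use", "old")]]), ("action", [[("m", "get")]])]]

def Spec_replacate_multivariable (multivariables : List (List (String × List (List (String × String))))) (out : List (List (String × List (List (String × String))))) : Prop := out = replacate_multivariable_alt multivariables
instance (multivariables : List (List (String × List (List (String × String))))) (out : List (List (String × List (List (String × String))))) : Decidable (Spec_replacate_multivariable multivariables out) := by unfold Spec_replacate_multivariable; infer_instance

-- ===== CLAIM (what is proved, stated in full; the proofs are below) =====
def Claim_equal_replacate_multivariable : Prop := ∀ (multivariables : List (List (String × List (List (String × String))))), Dom_replacate_multivariable multivariables → Pre_replacate_multivariable multivariables → Spec_replacate_multivariable multivariables (replacate_multivariable multivariables)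

-- ===== LEMMAS AND PROOFS =====

-- overwriting twice under the same key is overwriting once
lemma dset_dset (d : List (String × String)) (k v w : String) :
    dset (dset d k v) k w = dset d k w := by
  induction d with
  | nil => simp [dset]
  | cons p rest ih =>
    obtain ⟨k', v'⟩ := p
    by_cases h : k' = k
    · simp [dset, h]
    · simp [dset, h, ih]

-- proof-only helper: replace the i-th element
def setIdx (ins : List (List (String × String))) (i : Nat)
    (f : List (String × String) → List (String × String)) : List (List (String × String)) :=
  match ins, i with
  | [], _ => []
  | inp :: rest, 0 => f inp :: rest
  | inp :: rest, n + 1 => inp :: setIdx rest n f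

-- an append-only foldl is an append of a map
lemma foldl_app {α β : Type} (l : List α) (g : α → β) (res : List β) :
    l.foldl (fun acc x => acc ++ [g x]) res = res ++ l.map g := by
  induction l generalizing res with
  | nil => simp
  | cons x t ih => simp [ih]

-- A's counter loop equals map-to-static plus one positional overwrite
lemma markInputsA_eq (ins : List (List (String × String))) (i j : Nat) :
    markInputsA i j ins =
      if i < j then ins.map (fun inp => dset inp "input_use" "static")
      else setIdx (ins.map (fun inp => dset inp "input_use" "static")) (i - j)
        (fun inp => dset inp "input_use" "injection_point") := by
  induction ins generalizing j with
  | nil => simp [markInputsA, setIdx]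
  | cons inp rest ih =>
    rcases lt_trichotomy i j with h | h | h
    · have h1 : i < j + 1 := by omega
      have hne : ¬ i = j := by omega
      simp [markInputsA, hne, ih, h, h1]
    · subst h
      have h1 : i < i + 1 := by omega
      simp [markInputsA, ih, h1, setIdx, dset_dset]
    · have h0 : ¬ i < j := by omega
      have h1 : ¬ i < j + 1 := by omega
      have hne : ¬ i = j := by omega
      have hsub : i - j = (i - (j + 1)) + 1 := by omega
      simp [markInputsA, hne, ih, h0, h1, hsub, setIdx]

-- B's recursion enumerates exactly the positional overwrites of the static marking
lemma variantsB_eq (ins : List (List (String × String))) :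
    variantsB ins =
      (List.range ins.length).map (fun i =>
        setIdx (ins.map (fun inp => dset inp "input_use" "static")) i
          (fun inp => dset inp "input_use" "injection_point")) := by
  induction ins with
  | nil => simp [variantsB]
  | cons head tail ih =>
    simp [variantsB, List.range_succ_eq_map, ih, List.map_map, setIdx, dset_dset]

-- the swap map is the identity on a form without the "inputs" key
lemma swap_id (rest : List (String × List (List (String × String))))
    (m : List (List (String × String)))
    (h : "inputs" ∉ rest.map Prod.fst) :
    swapInputs rest m = rest := by
  induction rest with
  | nil => simp [swapInputs]
  | cons q rs ih =>
    simp only [List.map_cons, List.mem_cons, not_or] at h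
    have hk : (q.1 == "inputs") = false := by
      simp only [beq_eq_false_iff_ne, ne_eq]
      exact fun hh => h.1 hh.symm
    simp only [swapInputs, List.map_cons, hk, Bool.false_eq_true, if_false]
    have := ih h.2
    simp only [swapInputs] at this
    rw [this]

-- with nodup keys, in-place modification is the dict-comprehension swap
lemma dmodify_eq_swap (form : List (String × List (List (String × String))))
    (ins : List (List (String × String)))
    (f : List (List (String × String)) → List (List (String × String)))
    (hins : List.lookup "inputs" form = some ins)
    (hnodup : (form.map Prod.fst).Nodup) :
    dmodify form "inputs" f = swapInputs form (f ins) := by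
  induction form with
  | nil => simp [List.lookup] at hins
  | cons p rest ih =>
    obtain ⟨k, v⟩ := p
    simp only [List.map_cons, List.nodup_cons] at hnodup
    by_cases h : k = "inputs"
    · subst h
      simp only [List.lookup, beq_self_eq_true, Option.some.injEq] at hins
      subst hins
      have hrest : swapInputs rest (f v) = rest :=
        swap_id rest (f v) hnodup.1
      simp only [dmodify, swapInputs, List.map_cons, beq_self_eq_true, if_true] at *
      rw [hrest]
    · have hbk : ("inputs" == k) = false := by
        simp only [beq_eq_false_iff_ne, ne_eq]; exact fun hh => h hh.symm
      have hkb : (k == "inputs") = false := by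
        simp only [beq_eq_false_iff_ne, ne_eq]; exact h
      simp only [List.lookup, hbk] at hins
      have := ih hins hnodup.2
      simp only [swapInputs] at this
      simp only [dmodify, hkb, Bool.false_eq_true, if_false, swapInputs, List.map_cons, this]
-- ===== VERDICT (by name: the statement is the Claim_ definition above) =====
theorem replacate_multivariable_spec : Claim_equal_replacate_multivariable := by
  intro mv _ pre
  unfold Spec_replacate_multivariable replacate_multivariable replacate_multivariable_alt
  apply PySem.List.foldl_congr_mem
  intro acc form hmem
  obtain ⟨hsome, hnodup, -⟩ := pre form hmem
  obtain ⟨ins, hins⟩ := Option.isSome_iff_exists.mp hsome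
  rw [hins]
  simp only [Option.getD_some]
  rw [foldl_app, foldl_app, variantsB_eq, List.map_map]
  congr 1
  apply List.map_congr_left
  intro i _
  rw [dmodify_eq_swap form ins _ hins hnodup]
  have h := markInputsA_eq ins i 0
  simp only [Nat.not_lt_zero, if_false, Nat.sub_zero] at h
  simp [h]
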